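-- pv_equiv track=rewrite | github.com/liuyuhanalex/Leetcode | dynamic programming/397. Integer Replacement.py | integerReplacement1
-- ===== SOURCE A (Python) =====
-- def integerReplacement1(n: int) -> int:
--     # 动态规划，time limit exceeded
--     dp = [0] * (n+1)
--     for i in range(1, n+1):
--         if i % 2 == 0:
--             dp[i] = min(dp[i//2], dp[i-1]) + 1
--         else:
--             dp[i] = min(dp[i-1], dp[i//2+1]+1) + 1
--     return dp[-1] - 1
-- ===== SOURCE B (Python) =====
-- # Greedy on the binary representation: halve when even; for odd n take -1 when
-- # n == 3 or n % 4 == 1, else +1, which immediately enables a halving — two ops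
-- # per odd step, folded into one recursive call. O(log n) vs A's O(n) table.
-- def integerReplacement1(n: int) -> int:
--     def go(n: int) -> int:
--         if n <= 1:
--             return 0
--         if n % 2 == 0:
--             return 1 + go(n // 2)
--         if n == 3 or n % 4 == 1:
--             return 2 + go((n - 1) // 2)
--         return 2 + go((n + 1) // 2)
--     return go(n)
-- ===== Notes on version B (the rewrite author's own statement) =====
-- stated objective: faster
-- what changed: A fills an O(n) bottom-up DP table dp[0..n] and returns dp[n]-1; B is a greedy recursion on the binary representation (halve when even, choose -1 or +1 for odd n by n mod 4, n==3 special), touching only O(log n) values.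
-- outside the precondition, e.g. on integerReplacement1(0): A returns -1, B returns 0; on integerReplacement1(-1): A raises IndexError, B returns 0
import Mathlib
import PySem

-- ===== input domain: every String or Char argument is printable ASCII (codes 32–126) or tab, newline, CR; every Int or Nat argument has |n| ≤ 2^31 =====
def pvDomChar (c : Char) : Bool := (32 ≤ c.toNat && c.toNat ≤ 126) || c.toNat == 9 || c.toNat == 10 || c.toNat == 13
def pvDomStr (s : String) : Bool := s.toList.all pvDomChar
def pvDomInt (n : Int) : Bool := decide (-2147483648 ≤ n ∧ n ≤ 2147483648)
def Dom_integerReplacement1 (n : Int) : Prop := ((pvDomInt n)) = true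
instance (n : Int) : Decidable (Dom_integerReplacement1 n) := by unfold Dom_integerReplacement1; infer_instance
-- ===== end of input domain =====

-- B replaces A's O(n) bottom-up DP table by the greedy bit recursion (halve when even,
-- choose -1/+1 for odd n by n mod 4), O(log n); equal return value proved for n ≥ 1.

-- ===== PORT A =====
-- the Python list dp is an Array; pvGetA/pvSetA are Python's dp[i]/dp[i]=v with negative
-- indices counted from the end — exact wherever Python does not raise IndexError
def pvGetA (a : Array Int) (i : Int) : Int :=
  if 0 ≤ i then a.getD i.toNat 0 else a.getD (a.size - (-i).toNat) 0

def pvSetA (a : Array Int) (i : Int) (v : Int) : Array Int :=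
  if 0 ≤ i then a.setIfInBounds i.toNat v else a.setIfInBounds (a.size - (-i).toNat) v

-- A's loop body: the dp[i] update of one iteration
def pvStep (dp : Array Int) (i : Int) : Array Int :=
  if PySem.Int.mod i 2 = 0 then
    pvSetA dp i
      (min (pvGetA dp (PySem.Int.floordiv i 2)) (pvGetA dp (i - 1)) + 1)
  else
    pvSetA dp i
      (min (pvGetA dp (i - 1)) (pvGetA dp (PySem.Int.floordiv i 2 + 1) + 1) + 1)

def integerReplacement1 (n : Int) : Int :=
  let dp := (PySem.List.pyRange 1 (n + 1) 1).foldl pvStep (Array.replicate (n + 1).toNat 0)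
  pvGetA dp (-1) - 1

-- ===== PORT B =====
def pvGo (n : Int) : Int :=
  if n ≤ 1 then 0
  else if PySem.Int.mod n 2 = 0 then 1 + pvGo (PySem.Int.floordiv n 2)
  else if n = 3 ∨ PySem.Int.mod n 4 = 1 then 2 + pvGo (PySem.Int.floordiv (n - 1) 2)
  else 2 + pvGo (PySem.Int.floordiv (n + 1) 2)
termination_by n.toNat
decreasing_by
  all_goals
    simp only [PySem.Int.floordiv_eq_ediv_of_pos (by norm_num : (0:Int) < 2)]
    omega

def integerReplacement1_alt (n : Int) : Int := pvGo n

-- ===== PRECONDITION & SPEC =====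
-- Pre_ excludes n ≤ 0: A raises IndexError (dp[-1] on the empty table) for n < 0,
-- and at n = 0 its value -1 is an artefact of dp[-1] reading the untouched table.
def Pre_integerReplacement1 (n : Int) : Prop := 1 ≤ n
instance (n : Int) : Decidable (Pre_integerReplacement1 n) := by unfold Pre_integerReplacement1; infer_instance
def pvWitness_integerReplacement1 : Int := 6

def Spec_integerReplacement1 (n : Int) (out : Int) : Prop := out = integerReplacement1_alt n
instance (n : Int) (out : Int) : Decidable (Spec_integerReplacement1 n out) := by unfold Spec_integerReplacement1; infer_instance

-- ===== CLAIM (what is proved, stated in full; the proofs are below) =====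
def Claim_equal_integerReplacement1 : Prop := ∀ (n : Int), Dom_integerReplacement1 n → Pre_integerReplacement1 n → Spec_integerReplacement1 n (integerReplacement1 n)

-- ===== LEMMAS AND PROOFS =====

-- Nat shadow of B's greedy recursion
def G (n : Nat) : Nat :=
  if n ≤ 1 then 0
  else if n % 2 = 0 then 1 + G (n / 2)
  else if n = 3 ∨ n % 4 = 1 then 2 + G ((n - 1) / 2)
  else 2 + G ((n + 1) / 2)
termination_by n
decreasing_by all_goals omega

lemma G_le_one {n : Nat} (h : n ≤ 1) : G n = 0 := by
  conv_lhs => unfold G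
  simp [h]

lemma G_even' {m : Nat} (h2 : 2 ≤ m) (he : m % 2 = 0) : G m = 1 + G (m / 2) := by
  conv_lhs => unfold G
  rw [if_neg (by omega), if_pos he]

lemma G_odd1' {m : Nat} (hc : m = 3 ∨ m % 4 = 1) (h2 : 2 ≤ m) : G m = 2 + G ((m - 1) / 2) := by
  conv_lhs => unfold G
  rw [if_neg (by omega), if_neg (by omega), if_pos hc]

lemma G_odd3' {m : Nat} (ho : m % 2 = 1) (hc : ¬ (m = 3 ∨ m % 4 = 1)) :
    G m = 2 + G ((m + 1) / 2) := by
  conv_lhs => unfold G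
  rw [if_neg (by omega), if_neg (by omega), if_neg hc]

lemma G_two : G 2 = 1 := by
  rw [G_even' (by omega) (by omega)]
  norm_num [G_le_one]

lemma G_three : G 3 = 2 := by
  rw [G_odd1' (by omega) (by omega)]
  norm_num [G_le_one]

lemma G_four : G 4 = 2 := by
  rw [G_even' (by omega) (by omega)]
  norm_num [G_two]

-- the parity/step lemma for G
lemma G_step (k : Nat) :
    G (k + 1) ≤ G k + 1 ∧ G k ≤ G (k + 1) + 1 ∧
    (k % 2 = 0 → G k ≤ G (k + 1)) ∧ (k % 2 = 1 → 3 ≤ k → G (k + 1) ≤ G k) := by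
  induction k using Nat.strong_induction_on with
  | _ k IH =>
    rcases Nat.lt_or_ge k 4 with hk | hk
    · interval_cases k <;>
        simp [G_le_one, G_two, G_three, G_four]
    · have hj2 : 2 ≤ k / 2 := by omega
      by_cases hke : k % 2 = 0
      · have h1 : G k = 1 + G (k / 2) := G_even' (by omega) hke
        by_cases hje : k / 2 % 2 = 0
        · have h2 : G (k + 1) = 2 + G (k / 2) := by
            rw [G_odd1' (by omega) (by omega), show (k + 1 - 1) / 2 = k / 2 by omega]
          omega
        · have h2 : G (k + 1) = 2 + G (k / 2 + 1) := by
            rw [G_odd3' (by omega) (by omega), show (k + 1 + 1) / 2 = k / 2 + 1 by omega]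
          have h3 := IH (k / 2) (by omega)
          omega
      · have h1 : G (k + 1) = 1 + G (k / 2 + 1) := by
          rw [G_even' (by omega) (by omega), show (k + 1) / 2 = k / 2 + 1 by omega]
        by_cases hje : k / 2 % 2 = 0
        · have h2 : G k = 2 + G (k / 2) := by
            rw [G_odd1' (by omega) (by omega), show (k - 1) / 2 = k / 2 by omega]
          have h3 := IH (k / 2) (by omega)
          omega
        · have h2 : G k = 2 + G (k / 2 + 1) := by
            rw [G_odd3' (by omega) (by omega), show (k + 1) / 2 = k / 2 + 1 by omega]
          omega

-- G j ≤ G (2j - 1): the even-case dp minimum is the halving term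
lemma G_half_le {j : Nat} (h : 1 ≤ j) : G j ≤ G (2 * j - 1) := by
  rcases Nat.lt_or_ge j 3 with hj | hj
  · interval_cases j <;> simp [G_le_one, G_two, G_three]
  · have hm : 2 ≤ j - 1 := by omega
    by_cases he : (j - 1) % 2 = 0
    · have h2 : G (2 * j - 1) = 2 + G (j - 1) := by
        rw [G_odd1' (m := 2 * j - 1) (by omega) (by omega), show (2 * j - 1 - 1) / 2 = j - 1 by omega]
      have h3 := G_step (j - 1)
      have h4 : j - 1 + 1 = j := by omega
      rw [h4] at h3
      omega
    · have h2 : G (2 * j - 1) = 2 + G j := by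
        rw [G_odd3' (m := 2 * j - 1) (by omega) (by omega), show (2 * j - 1 + 1) / 2 = j by omega]
      omega

-- the dp odd-case recurrence holds for G
lemma G_odd_rec {j : Nat} (h : 1 ≤ j) :
    G (2 * j + 1) = min (G j) (G (j + 1)) + 2 := by
  rcases Nat.lt_or_ge j 2 with hj | hj
  · interval_cases j
    simp [G_three, G_le_one, G_two]
  · by_cases hje : j % 2 = 0
    · have h2 : G (2 * j + 1) = 2 + G j := by
        rw [G_odd1' (by omega) (by omega), show (2 * j + 1 - 1) / 2 = j by omega]
      have h3 := G_step j
      omega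
    · have h2 : G (2 * j + 1) = 2 + G (j + 1) := by
        rw [G_odd3' (by omega) (by omega), show (2 * j + 1 + 1) / 2 = j + 1 by omega]
      have h3 := G_step j
      omega

-- bridge: B's Int port equals G
lemma pvGo_eq (m : Nat) : pvGo (m : Int) = (G m : Int) := by
  induction m using Nat.strong_induction_on with
  | _ m IH =>
    conv_lhs => unfold pvGo
    simp only [PySem.Int.mod_eq_emod_of_pos (b := 2) (by norm_num),
      PySem.Int.mod_eq_emod_of_pos (b := 4) (by norm_num),
      PySem.Int.floordiv_eq_ediv_of_pos (b := 2) (by norm_num)]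
    by_cases h1 : m ≤ 1
    · rw [if_pos (by omega), G_le_one h1]
      simp
    · rw [if_neg (by omega)]
      by_cases h2 : m % 2 = 0
      · rw [if_pos (by omega), show ((m : Int) / 2) = ((m / 2 : Nat) : Int) by omega,
          IH (m / 2) (by omega), G_even' (by omega) h2]
        push_cast
        ring
      · rw [if_neg (by omega)]
        by_cases h3 : m = 3 ∨ m % 4 = 1
        · rw [if_pos (by omega), show ((m : Int) - 1) / 2 = (((m - 1) / 2 : Nat) : Int) by omega,
            IH ((m - 1) / 2) (by omega), G_odd1' h3 (by omega)]
          push_cast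
          ring
        · rw [if_neg (by omega), show ((m : Int) + 1) / 2 = (((m + 1) / 2 : Nat) : Int) by omega,
            IH ((m + 1) / 2) (by omega), G_odd3' (by omega) h3]
          push_cast
          ring

lemma arr_getD_lt {a : Array Int} {j : Nat} (h : j < a.size) : a.getD j 0 = a[j] := by
  simp [Array.getD, h]

lemma arr_getD_ge {a : Array Int} {j : Nat} (h : a.size ≤ j) : a.getD j 0 = 0 := by
  simp [Array.getD, Nat.not_lt.mpr h]

-- invariant of A's dp loop: after processing 1..k, cell j holds G j + 1 for 1 ≤ j ≤ k, else 0
lemma dp_inv (N : Nat) : ∀ k, k ≤ N →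
    (((PySem.List.pyRange 1 ((k : Int) + 1) 1).foldl pvStep (Array.replicate (N + 1) (0 : Int))).size = N + 1) ∧
    (∀ j : Nat, ((PySem.List.pyRange 1 ((k : Int) + 1) 1).foldl pvStep (Array.replicate (N + 1) (0 : Int))).getD j 0
        = if 1 ≤ j ∧ j ≤ k then (G j : Int) + 1 else 0) := by
  intro k
  induction k with
  | zero =>
    intro _
    rw [show ((0 : Nat) : Int) + 1 = 1 by norm_num, PySem.List.pyRange_one_eq_nil (by norm_num)]
    refine ⟨by simp, fun j => ?_⟩
    rw [if_neg (by omega)]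
    simp [Array.getD]
  | succ k IH =>
    intro hk
    obtain ⟨hlen, hget⟩ := IH (by omega)
    rw [show ((k + 1 : Nat) : Int) + 1 = ((k : Int) + 1) + 1 by push_cast; ring,
      PySem.List.pyRange_one_succ_right (by omega), List.foldl_append, List.foldl_cons, List.foldl_nil]
    set L := (PySem.List.pyRange 1 ((k : Int) + 1) 1).foldl pvStep (Array.replicate (N + 1) (0 : Int)) with hL
    unfold pvStep
    simp only [PySem.Int.mod_eq_emod_of_pos (b := 2) (by norm_num),
      PySem.Int.floordiv_eq_ediv_of_pos (b := 2) (by norm_num)]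
    have hgetc : ∀ m : Nat, pvGetA L ((m : Nat) : Int) = L.getD m 0 := by
      intro m
      unfold pvGetA
      rw [if_pos (by omega)]
      simp
    have hset : ∀ v : Int, pvSetA L ((k : Int) + 1) v = L.setIfInBounds (k + 1) v := by
      intro v
      unfold pvSetA
      rw [if_pos (by omega), show (((k : Int) + 1)).toNat = k + 1 by omega]
    have hkl : k + 1 < L.size := by omega
    have hgoal : ∀ v : Int, v = (G (k + 1) : Int) + 1 →
        ((L.setIfInBounds (k + 1) v).size = N + 1) ∧
        (∀ j : Nat, (L.setIfInBounds (k + 1) v).getD j 0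
            = if 1 ≤ j ∧ j ≤ k + 1 then (G j : Int) + 1 else 0) := by
      intro v hv
      refine ⟨by simpa [Array.size_setIfInBounds] using hlen, fun j => ?_⟩
      rcases Nat.lt_or_ge j (N + 1) with hj | hj
      · have hj' : j < L.size := by omega
        have hjs : j < (L.setIfInBounds (k + 1) v).size := by
          simpa [Array.size_setIfInBounds] using hj'
        rw [arr_getD_lt hjs, Array.getElem_setIfInBounds hj']
        by_cases hjk : k + 1 = j
        · rw [if_pos hjk, if_pos (by omega), ← hjk, hv]
        · rw [if_neg hjk, ← arr_getD_lt hj', hget j]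
          by_cases hc : 1 ≤ j ∧ j ≤ k
          · rw [if_pos hc, if_pos (by omega)]
          · rw [if_neg hc, if_neg (by omega)]
      · have hjs : (L.setIfInBounds (k + 1) v).size ≤ j := by
          simpa [Array.size_setIfInBounds] using (by omega : L.size ≤ j)
        rw [arr_getD_ge hjs, if_neg (by omega)]
    by_cases cp : (k + 1) % 2 = 0
    · rw [if_pos (by omega)]
      rw [show ((k : Int) + 1) / 2 = (((k + 1) / 2 : Nat) : Int) by omega,
        show ((k : Int) + 1) - 1 = ((k : Nat) : Int) by ring,
        hgetc ((k + 1) / 2), hgetc k, hset,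
        hget ((k + 1) / 2), hget k, if_pos (by omega), if_pos (by omega)]
      refine hgoal _ ?_
      have h1 : G (k + 1) = 1 + G ((k + 1) / 2) := G_even' (by omega) cp
      have h2 := G_half_le (j := (k + 1) / 2) (by omega)
      rw [show 2 * ((k + 1) / 2) - 1 = k by omega] at h2
      omega
    · rw [if_neg (by omega)]
      rw [show ((k : Int) + 1) - 1 = ((k : Nat) : Int) by ring,
        show ((k : Int) + 1) / 2 + 1 = (((k + 1) / 2 + 1 : Nat) : Int) by omega,
        hgetc k, hgetc ((k + 1) / 2 + 1), hset,
        hget k, hget ((k + 1) / 2 + 1)]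
      by_cases hk0 : k = 0
      · subst hk0
        rw [if_neg (by omega), if_neg (by omega)]
        refine hgoal _ ?_
        norm_num [G_le_one]
      · rw [if_pos (by omega), if_pos (by omega)]
        refine hgoal _ ?_
        have h1 : G k = 1 + G (k / 2) := G_even' (by omega) (by omega)
        have h2 := G_odd_rec (j := k / 2) (by omega)
        rw [show 2 * (k / 2) + 1 = k + 1 by omega] at h2
        rw [show (k + 1) / 2 + 1 = k / 2 + 1 by omega]
        omega

-- ===== VERDICT (by name: the statement is the Claim_ definition above) =====
theorem integerReplacement1_spec : Claim_equal_integerReplacement1 := by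
  unfold Claim_equal_integerReplacement1
  intro n hdom hpre
  unfold Pre_integerReplacement1 at hpre
  unfold Spec_integerReplacement1 integerReplacement1_alt
  obtain ⟨N, rfl⟩ : ∃ N : Nat, n = (N : Int) := ⟨n.toNat, by omega⟩
  have hN : 1 ≤ N := by exact_mod_cast hpre
  simp only [integerReplacement1]
  rw [show ((N : Int) + 1).toNat = N + 1 by omega]
  obtain ⟨hlen, hget⟩ := dp_inv N N (le_refl N)
  set L := (PySem.List.pyRange 1 ((N : Int) + 1) 1).foldl pvStep (Array.replicate (N + 1) (0 : Int)) with hL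
  have hL1 : pvGetA L (-1) = L.getD N 0 := by
    unfold pvGetA
    rw [if_neg (by norm_num)]
    congr 1
    omega
  rw [hL1, hget N, if_pos ⟨hN, le_refl N⟩, pvGo_eq N]
  ring
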